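-- pv_equiv track=rewrite | github.com/tyajhelo/se-toolkit-lab-6 | agent.py | find_heading_anchor
-- ===== SOURCE A (Python) =====
-- def slugify_heading(text: str) -> str:
--     chars = []
--     prev_dash = False
--     for ch in text.strip().lower():
--         if ch.isalnum():
--             chars.append(ch)
--             prev_dash = False
--         elif ch in " -_":
--             if not prev_dash:
--                 chars.append("-")
--                 prev_dash = True
--     return "".join(chars).strip("-")
--
-- def find_heading_anchor(content: str, needle: str) -> str | None:
--     needle = needle.lower()
--     for line in content.splitlines():
--         if line.startswith("#"):
--             heading = line.lstrip("#").strip()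
--             if heading and needle in heading.lower():
--                 return slugify_heading(heading)
--     return None
-- ===== SOURCE B (Python) =====
-- def slugify_heading(text: str) -> str:
--     # word-accumulator: collect alnum runs, join with single dashes (no prev_dash flag, no strip("-"))
--     words = []
--     current = ""
--     for ch in text.strip().lower():
--         if ch.isalnum():
--             current += ch
--         elif ch in " -_":
--             if current:
--                 words.append(current)
--             current = ""
--     if current:
--         words.append(current)
--     return "-".join(words)
--
--
-- def find_heading_anchor(content: str, needle: str) -> str | None:
--     needle = needle.lower()
--     headings = (line.lstrip("#").strip() for line in content.splitlines() if line.startswith("#"))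
--     return next((slugify_heading(h) for h in headings if h and needle in h.lower()), None)
-- ===== Notes on version B (the rewrite author's own statement) =====
-- stated objective: alternative
-- what changed: slugify_heading's single-pass prev_dash state machine with trailing strip('-') is replaced by a word accumulator (collect alnum runs, join with '-'), and the heading loop is replaced by a filter/map generator with next(..., None).
import Mathlib
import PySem

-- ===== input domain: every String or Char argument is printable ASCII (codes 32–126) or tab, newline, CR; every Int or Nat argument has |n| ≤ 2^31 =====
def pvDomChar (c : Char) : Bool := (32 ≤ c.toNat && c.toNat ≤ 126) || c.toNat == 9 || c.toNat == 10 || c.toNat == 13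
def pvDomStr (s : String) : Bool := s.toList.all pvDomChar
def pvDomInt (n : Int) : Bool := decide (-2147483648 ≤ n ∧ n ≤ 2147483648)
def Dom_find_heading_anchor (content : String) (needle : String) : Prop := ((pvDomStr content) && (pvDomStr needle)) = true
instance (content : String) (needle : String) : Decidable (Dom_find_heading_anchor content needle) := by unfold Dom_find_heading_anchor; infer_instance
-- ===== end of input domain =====

-- B replaces A's prev_dash state machine + strip("-") by a word accumulator joined with "-",
-- and the heading loop by filter/map + first match (objective: alternative decomposition).

-- ===== PORT A =====
-- slugify_heading: char list + prev_dash flag, then "".join(...).strip("-")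
def slugify_heading_A (text : List Char) : List Char :=
  let st := (PySem.Chars.lower (PySem.Chars.strip text)).foldl
      (fun (st : List Char × Bool) ch =>
        if PySem.Chars.isalnum ch then (st.1 ++ [ch], false)
        else if [' ', '-', '_'].contains ch then
          (if st.2 then st else (st.1 ++ ['-'], true))
        else st) ([], false)
  PySem.Chars.stripChars st.1 ['-']

-- the 'for line in content.splitlines(): … return …' loop, early return = Option result
-- (line.lstrip("#") = drop leading '#' chars: exact)
def find_heading_anchor_A_loop (needle : List Char) : List (List Char) → Option (List Char)
  | [] => none
  | line :: rest =>
      if PySem.Chars.startswith line ['#'] then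
        let heading := PySem.Chars.strip (line.dropWhile (fun c => c == '#'))
        if !heading.isEmpty && PySem.Chars.isIn needle (PySem.Chars.lower heading) then
          some (slugify_heading_A heading)
        else find_heading_anchor_A_loop needle rest
      else find_heading_anchor_A_loop needle rest

def find_heading_anchor (content : String) (needle : String) : Option String :=
  (find_heading_anchor_A_loop (PySem.Chars.lower needle.toList)
      (PySem.Chars.splitlines content.toList)).map String.ofList

-- ===== PORT B =====
-- slugify_heading (B): accumulate alnum runs as words, join with "-" (no dash flag, no strip)
def slugify_heading_B (text : List Char) : List Char :=
  let st := (PySem.Chars.lower (PySem.Chars.strip text)).foldl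
      (fun (st : List (List Char) × List Char) ch =>
        if PySem.Chars.isalnum ch then (st.1, st.2 ++ [ch])
        else if [' ', '-', '_'].contains ch then
          ((if st.2.isEmpty then st.1 else st.1 ++ [st.2]), ([] : List Char))
        else st) ([], [])
  PySem.Chars.join ['-'] (if st.2.isEmpty then st.1 else st.1 ++ [st.2])

-- headings generator = filter + map; next(… , None) = first match
def find_heading_anchor_alt (content : String) (needle : String) : Option String :=
  let needleL := PySem.Chars.lower needle.toList
  let headings := ((PySem.Chars.splitlines content.toList).filter
        (fun line => PySem.Chars.startswith line ['#'])).map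
        (fun line => PySem.Chars.strip (line.dropWhile (fun c => c == '#')))
  (headings.find? (fun h => !h.isEmpty && PySem.Chars.isIn needleL (PySem.Chars.lower h))).map
    (fun h => String.ofList (slugify_heading_B h))

-- ===== PRECONDITION & SPEC =====
def Spec_find_heading_anchor (content : String) (needle : String) (out : Option String) : Prop := out = find_heading_anchor_alt content needle
instance (content : String) (needle : String) (out : Option String) : Decidable (Spec_find_heading_anchor content needle out) := by unfold Spec_find_heading_anchor; infer_instance

-- ===== CLAIM (what is proved, stated in full; the proofs are below) =====
def Claim_equal_find_heading_anchor : Prop := ∀ (content : String) (needle : String), Dom_find_heading_anchor content needle → Spec_find_heading_anchor content needle (find_heading_anchor content needle)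

-- ===== LEMMAS AND PROOFS =====

-- per-character emission: alnum chars pass through, separator chars become '-', others vanish
def pvMapped (cs : List Char) : List Char :=
  cs.flatMap (fun c => if PySem.Chars.isalnum c then [c]
    else if [' ', '-', '_'].contains c then ['-'] else [])

-- A's machine, replayed on the emitted characters: dedup adjacent dashes
def pvCollapse : Bool → List Char → List Char
  | _, [] => []
  | prev, c :: r => if c = '-' then (if prev then pvCollapse true r else '-' :: pvCollapse true r)
      else c :: pvCollapse false r

-- B's machine, replayed on the emitted characters: the non-empty dash-free runs
def pvWords : List Char → List Char → List (List Char)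
  | [], cur => if cur = [] then [] else [cur]
  | c :: r, cur => if c = '-' then (if cur = [] then pvWords r [] else cur :: pvWords r [])
      else pvWords r (cur ++ [c])

def pvLd (m : List Char) : List (List Char) := if m.head? = some '-' then [[]] else []
def pvTl (m : List Char) : List (List Char) := if m.getLast? = some '-' then [[]] else []

theorem pv_isalnum_ne_dash {c : Char} (h : PySem.Chars.isalnum c = true) : c ≠ '-' := by
  rintro rfl; exact absurd h (by decide)

-- A's fold over the source characters = pvCollapse over the emitted characters
theorem pv_foldA (cs : List Char) (out : List Char) (prev : Bool) :
    (cs.foldl (fun (st : List Char × Bool) ch =>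
        if PySem.Chars.isalnum ch then (st.1 ++ [ch], false)
        else if [' ', '-', '_'].contains ch then
          (if st.2 then st else (st.1 ++ ['-'], true))
        else st) (out, prev)).1 = out ++ pvCollapse prev (pvMapped cs) := by
  induction cs generalizing out prev with
  | nil => simp [pvMapped, pvCollapse]
  | cons ch r ih =>
      by_cases ha : PySem.Chars.isalnum ch = true
      · have hne : ch ≠ '-' := pv_isalnum_ne_dash ha
        simp only [List.foldl_cons, pvMapped, List.flatMap_cons, ha, if_true]
        rw [ih]
        simp [pvCollapse, hne, pvMapped]
      · by_cases hm : [' ', '-', '_'].contains ch = true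
        · simp only [List.foldl_cons, pvMapped, List.flatMap_cons, ha, hm, if_true, if_false,
            Bool.false_eq_true]
          cases prev with
          | true => rw [ih]; simp [pvCollapse, pvMapped]
          | false => rw [ih]; simp [pvCollapse, pvMapped]
        · simp only [List.foldl_cons, pvMapped, List.flatMap_cons, ha, hm, if_false,
            Bool.false_eq_true]
          rw [ih]
          simp [pvMapped]

-- B's fold (with its final flush) over the source characters = pvWords over the emitted characters
theorem pv_foldB (cs : List Char) (ws : List (List Char)) (cur : List Char) :
    (let st := cs.foldl (fun (st : List (List Char) × List Char) ch =>
        if PySem.Chars.isalnum ch then (st.1, st.2 ++ [ch])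
        else if [' ', '-', '_'].contains ch then
          ((if st.2.isEmpty then st.1 else st.1 ++ [st.2]), ([] : List Char))
        else st) (ws, cur)
      if st.2.isEmpty then st.1 else st.1 ++ [st.2]) = ws ++ pvWords (pvMapped cs) cur := by
  induction cs generalizing ws cur with
  | nil =>
      by_cases hc : cur = []
      · simp [pvMapped, pvWords, hc]
      · simp [pvMapped, pvWords, hc, List.isEmpty_iff]
  | cons ch r ih =>
      by_cases ha : PySem.Chars.isalnum ch = true
      · have hne : ch ≠ '-' := pv_isalnum_ne_dash ha
        simp only [List.foldl_cons, pvMapped, List.flatMap_cons, ha, if_true]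
        rw [ih]
        simp [pvWords, hne, pvMapped]
      · by_cases hm : [' ', '-', '_'].contains ch = true
        · simp only [List.foldl_cons, pvMapped, List.flatMap_cons, ha, hm, if_true, if_false,
            Bool.false_eq_true]
          by_cases hc : cur = []
          · rw [ih]; simp [pvWords, pvMapped, hc]
          · rw [ih]
            simp only [List.isEmpty_iff, hc, if_false, pvMapped]
            simp [pvWords, hc]
        · simp only [List.foldl_cons, pvMapped, List.flatMap_cons, ha, hm, if_false,
            Bool.false_eq_true]
          rw [ih]
          simp [pvMapped]

theorem pv_intercalate_cons (sep a : List Char) (xs : List (List Char)) (h : xs ≠ []) :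
    List.intercalate sep (a :: xs) = a ++ sep ++ List.intercalate sep xs := by
  cases xs with
  | nil => exact absurd rfl h
  | cons b l => simp [List.intercalate, List.intersperse]

theorem pv_intercalate_snoc_nil (sep : List Char) (xs : List (List Char)) (h : xs ≠ []) :
    List.intercalate sep (xs ++ [[]]) = List.intercalate sep xs ++ sep := by
  induction xs with
  | nil => exact absurd rfl h
  | cons a l ih =>
      cases l with
      | nil => simp [List.intercalate, List.intersperse]
      | cons b l' =>
          rw [List.cons_append, pv_intercalate_cons sep a (((b :: l') ++ [[]])) (by simp),
            pv_intercalate_cons sep a (b :: l') (by simp), ih (by simp)]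
          simp

theorem pv_words_ne (r : List Char) (cur : List Char)
    (h : (∃ a ∈ r, a ≠ '-') ∨ cur ≠ []) : pvWords r cur ≠ [] := by
  induction r generalizing cur with
  | nil =>
      rcases h with ⟨a, ha, _⟩ | h
      · simp at ha
      · simp [pvWords, h]
  | cons c t ih =>
      by_cases hd : c = '-'
      · subst hd
        by_cases hc : cur = []
        · simp only [pvWords, hc, reduceIte]
          refine ih [] (Or.inl ?_)
          rcases h with ⟨a, ha, hane⟩ | h
          · rcases List.mem_cons.mp ha with rfl | ha
            · exact absurd rfl hane
            · exact ⟨a, ha, hane⟩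
          · exact absurd hc h
        · simp [pvWords, hc]
      · simp only [pvWords, if_neg hd]
        exact ih (cur ++ [c]) (Or.inr (by simp))

theorem pv_words_tl_ne (r : List Char) (h : r ≠ []) : pvWords r [] ++ pvTl r ≠ [] := by
  by_cases hl : r.getLast? = some '-'
  · simp [pvTl, hl]
  · intro hcon
    rcases List.append_eq_nil_iff.mp hcon with ⟨h1, _⟩
    cases ha : r.getLast? with
    | none => exact h (List.getLast?_eq_none_iff.mp ha)
    | some a =>
        refine absurd h1 (pv_words_ne r [] (Or.inl ⟨a, List.mem_of_getLast? ha, ?_⟩))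
        rintro rfl
        exact hl ha

-- elements of pvWords are nonempty and dash-free
theorem pv_words_props (r : List Char) (cur : List Char) (hcur : '-' ∉ cur) :
    ∀ w ∈ pvWords r cur, w ≠ [] ∧ '-' ∉ w := by
  induction r generalizing cur with
  | nil =>
      intro w hw
      by_cases hc : cur = []
      · simp [pvWords, hc] at hw
      · simp only [pvWords, if_neg hc, List.mem_singleton] at hw
        exact hw ▸ ⟨hc, hcur⟩
  | cons c t ih =>
      intro w hw
      by_cases hd : c = '-'
      · subst hd
        by_cases hc : cur = []
        · simp [pvWords, hc] at hw
          exact ih [] (by simp) w hw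
        · simp [pvWords, hc] at hw
          rcases hw with hweq | hw
          · exact hweq ▸ ⟨hc, hcur⟩
          · exact ih [] (by simp) w hw
      · simp only [pvWords, if_neg hd] at hw
        exact ih (cur ++ [c]) (by simp [hcur, Ne.symm hd]) w hw

theorem pvTl_cons (c : Char) (r : List Char) (hr : r ≠ []) : pvTl (c :: r) = pvTl r := by
  cases r with
  | nil => exact absurd rfl hr
  | cons b t => simp [pvTl, List.getLast?_cons_cons]

-- the collapse/words correspondence (both statements proved together by induction)
theorem pv_collapse_words (m : List Char) :
    (∀ cur, cur ≠ [] →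
        cur ++ pvCollapse false m = List.intercalate ['-'] (pvWords m cur ++ pvTl m)) ∧
    pvCollapse true m = List.intercalate ['-'] (pvWords m [] ++ pvTl m) := by
  induction m with
  | nil =>
      constructor
      · intro cur hc
        simp [pvCollapse, pvWords, pvTl, hc, List.intercalate]
      · simp [pvCollapse, pvWords, pvTl, List.intercalate]
  | cons c r ih =>
      obtain ⟨ihP, ihQ⟩ := ih
      by_cases hd : c = '-'
      · subst hd
        by_cases hr : r = []
        · subst hr
          constructor
          · intro cur hc
            simp [pvCollapse, pvWords, pvTl, hc, List.intercalate, List.intersperse]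
          · simp [pvCollapse, pvWords, pvTl, List.intercalate]
        · have htl : pvTl ('-' :: r) = pvTl r := pvTl_cons _ r hr
          have hX : pvWords r [] ++ pvTl r ≠ [] := pv_words_tl_ne r hr
          constructor
          · intro cur hc
            have hlhs : cur ++ pvCollapse false ('-' :: r) =
                cur ++ '-' :: pvCollapse true r := by simp [pvCollapse]
            rw [hlhs]
            have hw : pvWords ('-' :: r) cur = cur :: pvWords r [] := by
              simp [pvWords, hc]
            rw [hw, htl, List.cons_append, pv_intercalate_cons _ _ _ hX, ihQ]
            simp [List.append_assoc]
          · have hw : pvWords ('-' :: r) [] = pvWords r [] := by simp [pvWords]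
            have hlhs : pvCollapse true ('-' :: r) = pvCollapse true r := by
              simp [pvCollapse]
            rw [hlhs, hw, htl, ihQ]
      · have htl : pvTl (c :: r) = pvTl r := by
          by_cases hr : r = []
          · subst hr; simp [pvTl, hd]
          · exact pvTl_cons c r hr
        constructor
        · intro cur hc
          have hlhs : cur ++ pvCollapse false (c :: r) =
              (cur ++ [c]) ++ pvCollapse false r := by simp [pvCollapse, hd]
          have hw : pvWords (c :: r) cur = pvWords r (cur ++ [c]) := by simp [pvWords, hd]
          rw [hlhs, hw, htl, ihP (cur ++ [c]) (by simp)]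
        · have hlhs : pvCollapse true (c :: r) = [c] ++ pvCollapse false r := by
            simp [pvCollapse, hd]
          have hw : pvWords (c :: r) [] = pvWords r [c] := by
            simp [pvWords, hd]
          rw [hlhs, hw, htl, ihP [c] (by simp)]

theorem pv_collapse_closed (m : List Char) :
    pvCollapse false m = List.intercalate ['-'] (pvLd m ++ pvWords m [] ++ pvTl m) := by
  cases m with
  | nil => simp [pvCollapse, pvWords, pvLd, pvTl, List.intercalate]
  | cons c r =>
      by_cases hd : c = '-'
      · subst hd
        by_cases hr : r = []
        · subst hr
          simp [pvCollapse, pvWords, pvLd, pvTl, List.intercalate, List.intersperse]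
        · have hX : pvWords r [] ++ pvTl r ≠ [] := pv_words_tl_ne r hr
          have hld : pvLd ('-' :: r) = [[]] := by simp [pvLd]
          have hw : pvWords ('-' :: r) [] = pvWords r [] := by simp [pvWords]
          have hlhs : pvCollapse false ('-' :: r) = '-' :: pvCollapse true r := by
            simp [pvCollapse]
          rw [hlhs, hld, hw, pvTl_cons _ r hr, (pv_collapse_words r).2]
          simp only [List.nil_append, List.cons_append]
          rw [pv_intercalate_cons _ _ _ hX]
          simp
      · have hld : pvLd (c :: r) = [] := by simp [pvLd, hd]
        have htl : pvTl (c :: r) = pvTl r := by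
          by_cases hr : r = []
          · subst hr; simp [pvTl, hd]
          · exact pvTl_cons c r hr
        have hw : pvWords (c :: r) [] = pvWords r [c] := by simp [pvWords, hd]
        have hlhs : pvCollapse false (c :: r) = [c] ++ pvCollapse false r := by
          simp [pvCollapse, hd]
        rw [hlhs, hld, hw, htl]
        simp only [List.nil_append]
        rw [← (pv_collapse_words r).1 [c] (by simp)]

theorem pv_intercalate_getLast (ws : List (List Char)) (hne : ws ≠ [])
    (hw : ∀ w ∈ ws, w ≠ [] ∧ '-' ∉ w) :
    ∃ a, (List.intercalate ['-'] ws).getLast? = some a ∧ a ≠ '-' := by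
  induction ws with
  | nil => exact absurd rfl hne
  | cons w ws' ih =>
      cases ws' with
      | nil =>
          obtain ⟨hwne, hwdf⟩ := hw w (List.mem_cons_self)
          cases ha : w.getLast? with
          | none => exact absurd (List.getLast?_eq_none_iff.mp ha) hwne
          | some a =>
              refine ⟨a, by simpa [List.intercalate] using ha, ?_⟩
              rintro rfl
              exact hwdf (List.mem_of_getLast? ha)
      | cons v t =>
          obtain ⟨a, ha, hane⟩ := ih (by simp) (fun u hu => hw u (List.mem_cons_of_mem _ hu))
          refine ⟨a, ?_, hane⟩
          rw [pv_intercalate_cons _ _ _ (by simp)]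
          rw [List.getLast?_append, List.getLast?_append, ha]
          rfl

theorem pv_dropDash_cons (t : List Char) :
    List.dropWhile (fun c => List.contains ['-'] c) ('-' :: t) =
      List.dropWhile (fun c => List.contains ['-'] c) t := by
  simp

theorem pv_dropDash_ne (a : Char) (t : List Char) (ha : a ≠ '-') :
    List.dropWhile (fun c => List.contains ['-'] c) (a :: t) = a :: t := by
  simp [ha]

-- stripping dashes from the join with optional empty boundary parts recovers the plain join
theorem pv_stripChars_join (ws : List (List Char)) (hw : ∀ w ∈ ws, w ≠ [] ∧ '-' ∉ w)
    (pre post : List (List Char)) (hpre : pre = [] ∨ pre = [[]])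
    (hpost : post = [] ∨ post = [[]]) :
    PySem.Chars.stripChars (List.intercalate ['-'] (pre ++ ws ++ post)) ['-'] =
      List.intercalate ['-'] ws := by
  cases ws with
  | nil =>
      rcases hpre with rfl | rfl <;> rcases hpost with rfl | rfl <;> decide
  | cons w ws' =>
      obtain ⟨hwne, hwdf⟩ := hw w (List.mem_cons_self)
      obtain ⟨a, w', rfl⟩ : ∃ a w', w = a :: w' := by
        cases w with
        | nil => exact absurd rfl hwne
        | cons a w' => exact ⟨a, w', rfl⟩
      have hane : a ≠ '-' := fun h => hwdf (h ▸ List.mem_cons_self)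
      -- the joined words start with the non-dash character a
      obtain ⟨tail, htail⟩ :
          ∃ tail, List.intercalate ['-'] ((a :: w') :: ws') = a :: tail := by
        cases ws' with
        | nil => exact ⟨w', by simp [List.intercalate]⟩
        | cons v t =>
            refine ⟨w' ++ ['-'] ++ List.intercalate ['-'] (v :: t), ?_⟩
            rw [pv_intercalate_cons _ _ _ (by simp)]
            simp
      -- and end with a non-dash character b
      obtain ⟨b, hb, hbne⟩ := pv_intercalate_getLast _ (by simp) hw
      -- left strip leaves J ++ R intact once the leading dash (if any) is gone
      have hJR : ∀ (R : List Char),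
          List.dropWhile (fun c => List.contains ['-'] c)
              (List.intercalate ['-'] ((a :: w') :: ws') ++ R) =
            List.intercalate ['-'] ((a :: w') :: ws') ++ R := by
        intro R
        rw [htail, List.cons_append]
        exact pv_dropDash_ne a (tail ++ R) hane
      -- the reverse of J starts with the non-dash character b
      obtain ⟨s', hs'⟩ : ∃ s',
          (List.intercalate ['-'] ((a :: w') :: ws')).reverse = b :: s' := by
        cases hrv : (List.intercalate ['-'] ((a :: w') :: ws')).reverse with
        | nil =>
            rw [List.reverse_eq_nil_iff] at hrv
            rw [hrv] at hb
            simp at hb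
        | cons x t =>
            have hx : some x = some b := by
              rw [← hb, ← List.head?_reverse, hrv]; rfl
            obtain rfl := Option.some.inj hx
            exact ⟨t, by first | exact hrv | rfl⟩
      -- right strip of J leaves J intact
      have hRJ : (List.dropWhile (fun c => List.contains ['-'] c)
            (List.intercalate ['-'] ((a :: w') :: ws')).reverse).reverse =
          List.intercalate ['-'] ((a :: w') :: ws') := by
        rw [hs', pv_dropDash_ne b s' hbne, ← hs', List.reverse_reverse]
      have hsnoc : List.intercalate ['-'] ((a :: w') :: ws' ++ [[]]) =
          List.intercalate ['-'] ((a :: w') :: ws') ++ ['-'] :=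
        pv_intercalate_snoc_nil _ _ (by simp)
      have hJ1 : List.dropWhile (fun c => List.contains ['-'] c)
          (List.intercalate ['-'] ((a :: w') :: ws')) =
            List.intercalate ['-'] ((a :: w') :: ws') := by
        have h := hJR []
        simpa only [List.append_nil] using h
      rcases hpre with rfl | rfl <;> rcases hpost with rfl | rfl
      · -- no decorations
        simp only [List.nil_append, List.append_nil, PySem.Chars.stripChars]
        rw [hJ1, hRJ]
      · -- trailing empty part only: one trailing dash to strip
        simp only [List.nil_append, PySem.Chars.stripChars]
        rw [hsnoc, hJR ['-'], List.reverse_append, List.reverse_singleton,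
          List.singleton_append, pv_dropDash_cons, hs', pv_dropDash_ne b s' hbne, ← hs',
          List.reverse_reverse]
      · -- leading empty part only: one leading dash to strip
        simp only [List.append_nil, List.cons_append, PySem.Chars.stripChars]
        rw [pv_intercalate_cons _ _ _ (by simp)]
        simp only [List.nil_append]
        rw [List.singleton_append, pv_dropDash_cons, hJ1, hRJ]
      · -- both boundary dashes
        simp only [List.cons_append, PySem.Chars.stripChars]
        rw [pv_intercalate_cons _ _ _ (by simp)]
        simp only [List.nil_append]
        rw [hsnoc, List.singleton_append, pv_dropDash_cons, hJR ['-'], List.reverse_append,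
          List.reverse_singleton, List.singleton_append, pv_dropDash_cons, hs',
          pv_dropDash_ne b s' hbne, ← hs', List.reverse_reverse]

theorem pv_slug_eq (text : List Char) : slugify_heading_A text = slugify_heading_B text := by
  have hA := pv_foldA (PySem.Chars.lower (PySem.Chars.strip text)) [] false
  have hB := pv_foldB (PySem.Chars.lower (PySem.Chars.strip text)) [] []
  simp only [] at hB
  simp only [slugify_heading_A, slugify_heading_B]
  rw [hA, hB]
  simp only [List.nil_append]
  rw [pv_collapse_closed, PySem.Chars.join]
  exact pv_stripChars_join _ (pv_words_props _ [] (by simp)) _ _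
    (by unfold pvLd; split <;> simp) (by unfold pvTl; split <;> simp)

theorem pv_find_loop (needle : List Char) (lines : List (List Char)) :
    find_heading_anchor_A_loop needle lines =
      (((lines.filter (fun line => PySem.Chars.startswith line ['#'])).map
          (fun line => PySem.Chars.strip (line.dropWhile (fun c => c == '#')))).find?
        (fun h => !h.isEmpty && PySem.Chars.isIn needle (PySem.Chars.lower h))).map
        slugify_heading_A := by
  induction lines with
  | nil => rfl
  | cons line rest ih =>
      by_cases hs : PySem.Chars.startswith line ['#'] = true
      · by_cases hc : (!(PySem.Chars.strip (line.dropWhile (fun c => c == '#'))).isEmpty &&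
            PySem.Chars.isIn needle
              (PySem.Chars.lower (PySem.Chars.strip (line.dropWhile (fun c => c == '#'))))) = true
        · simp [find_heading_anchor_A_loop, hs, hc]
        · simp only [find_heading_anchor_A_loop, List.filter_cons, hs, if_true, List.map_cons,
            List.find?_cons, hc, if_false, Bool.false_eq_true]
          exact ih
      · simp only [find_heading_anchor_A_loop, List.filter_cons, hs, if_false, Bool.false_eq_true]
        exact ih

-- ===== VERDICT (by name: the statement is the Claim_ definition above) =====
theorem find_heading_anchor_spec : Claim_equal_find_heading_anchor := by
  intro content needle _
  unfold Spec_find_heading_anchor find_heading_anchor find_heading_anchor_alt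
  rw [pv_find_loop]
  simp only [Option.map_map]
  congr 1
  funext h
  simp [Function.comp, pv_slug_eq]
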